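-- pv_equiv track=rewrite | github.com/cda-tum/mmft-ooc-designer | OOCGenerator.py | remove_shared_faces
-- ===== SOURCE A (Python) =====
-- def remove_shared_faces(all_faces: list):
--     '''
--     Remove shared faces from the list of faces. This is necessary to achieve a continious channel in the geometry definition.
--     '''
--     # Create a dictionary to count faces. Use sorted tuple for comparison but store original list.
--     face_count = {}
--     for face in all_faces:
--         sorted_face = tuple(sorted(face))
--         if sorted_face in face_count:
--             face_count[sorted_face][1] += 1  # Increase count
--         else:
--             face_count[sorted_face] = [face, 1]  # Store original face and set count to 1
--
--     # Select faces which occur exactly once, preserving their original order.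
--     unique_faces = [original_face for original_face, count in face_count.values() if count == 1]
--
--     return unique_faces
-- ===== SOURCE B (Python) =====
-- def remove_shared_faces(all_faces: list):
--     '''
--     Remove shared faces by repeated elimination instead of counting: take the
--     first remaining face; if any other remaining face has the same canonical
--     key tuple(sorted(face)), discard every remaining face with that key;
--     otherwise keep it. Output preserves original order.
--     '''
--     remaining = [(face, tuple(sorted(face))) for face in all_faces]
--     unique_faces = []
--     while remaining:
--         (face, key), rest = remaining[0], remaining[1:]
--         if any(k == key for _, k in rest):
--             remaining = [(f, k) for f, k in rest if k != key]
--         else: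
--             unique_faces.append(face)
--             remaining = rest
--     return unique_faces
-- ===== Notes on version B (the rewrite author's own statement) =====
-- stated objective: alternative
-- what changed: Replaced the count-in-a-dict-then-select pass with a worklist elimination: repeatedly take the first remaining face and either discard every remaining face sharing its sorted key (if one exists) or emit it; no counts are ever kept.
import Mathlib
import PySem

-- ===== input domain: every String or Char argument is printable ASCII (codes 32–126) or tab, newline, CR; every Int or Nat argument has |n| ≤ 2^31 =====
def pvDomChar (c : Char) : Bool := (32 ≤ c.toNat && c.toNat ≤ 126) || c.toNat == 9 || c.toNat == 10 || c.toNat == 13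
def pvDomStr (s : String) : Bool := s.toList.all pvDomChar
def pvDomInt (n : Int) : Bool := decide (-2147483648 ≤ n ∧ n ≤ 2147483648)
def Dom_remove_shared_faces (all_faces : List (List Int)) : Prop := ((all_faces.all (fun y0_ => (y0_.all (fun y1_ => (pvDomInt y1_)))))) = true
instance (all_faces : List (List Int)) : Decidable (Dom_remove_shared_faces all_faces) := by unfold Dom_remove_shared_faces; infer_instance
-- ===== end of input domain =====

-- B replaces A's counting dict with a worklist elimination (pop head; drop all
-- key-sharing faces, or emit it) — objective: alternative; not faster.

-- ===== PORT A =====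
-- tuple(sorted(face)) — the canonical key both Pythons compute
def pvKey (face : List Int) : List Int := PySem.List.sorted face (fun x => x) false

-- the body of A's 'for face in all_faces' loop
def pvStepA (d : PySem.Dict (List Int) (List Int × Int)) (face : List Int) :
    PySem.Dict (List Int) (List Int × Int) :=
  if d.contains (pvKey face) then
    d.modify (pvKey face) ([], 0) (fun p => (p.1, p.2 + 1))
  else
    d.insert (pvKey face) (face, 1)

def remove_shared_faces (all_faces : List (List Int)) : List (List Int) :=
  let face_count := all_faces.foldl pvStepA PySem.Dict.empty
  (face_count.values.filter (fun p => p.2 == 1)).map (fun p => p.1)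

-- ===== PORT B =====
-- B's 'while remaining' loop: structural recursion on the (face, key) worklist
def pvLoopB (remaining : List (List Int × List Int)) : List (List Int) :=
  match remaining with
  | [] => []
  | (face, key) :: rest =>
    if rest.any (fun p => p.2 == key) then
      pvLoopB (rest.filter (fun p => p.2 != key))
    else
      face :: pvLoopB rest
termination_by remaining.length
decreasing_by
  · calc ((rest.attach.filter _).unattach).length
        = (rest.attach.filter _).length := List.length_unattach ..
      _ ≤ rest.attach.length := List.length_filter_le _ _
      _ < rest.length + 1 := by rw [List.length_attach]; exact Nat.lt_succ_self _
  · exact Nat.lt_succ_self _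

def remove_shared_faces_alt (all_faces : List (List Int)) : List (List Int) :=
  pvLoopB (all_faces.map (fun face => (face, pvKey face)))

-- ===== PRECONDITION & SPEC =====
def Spec_remove_shared_faces (all_faces : List (List Int)) (out : List (List Int)) : Prop := out = remove_shared_faces_alt all_faces
instance (all_faces : List (List Int)) (out : List (List Int)) : Decidable (Spec_remove_shared_faces all_faces out) := by unfold Spec_remove_shared_faces; infer_instance

-- ===== CLAIM (what is proved, stated in full; the proofs are below) =====
def Claim_equal_remove_shared_faces : Prop := ∀ (all_faces : List (List Int)), Dom_remove_shared_faces all_faces → Spec_remove_shared_faces all_faces (remove_shared_faces all_faces)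

-- ===== LEMMAS AND PROOFS =====

-- A's selection over values equals a filterMap over items
theorem pv_extract_eq (d : PySem.Dict (List Int) (List Int × Int)) :
    (d.values.filter (fun p => p.2 == 1)).map (fun p => p.1)
      = d.items.filterMap (fun kv => if kv.2.2 == 1 then some kv.2.1 else none) := by
  show ((d.items.map Prod.snd).filter (fun p => p.2 == 1)).map (fun p => p.1)
      = d.items.filterMap (fun kv => if kv.2.2 == 1 then some kv.2.1 else none)
  induction d.items with
  | nil => rfl
  | cons kv t ih =>
      simp only [List.map_cons, List.filter_cons, List.filterMap_cons]
      by_cases h : kv.2.2 = 1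
      · simp [h, ih]
      · simp [h, ih]

theorem pv_nodup_step (d : PySem.Dict (List Int) (List Int × Int)) (f : List Int)
    (h : d.keys.Nodup) : (pvStepA d f).keys.Nodup := by
  unfold pvStepA
  split
  · unfold PySem.Dict.modify
    exact PySem.Dict.nodup_keys_insert _ _ _ h
  · exact PySem.Dict.nodup_keys_insert _ _ _ h

-- loop invariant for A's counting pass
theorem pv_loopA (l : List (List Int)) :
    ∀ (d : PySem.Dict (List Int) (List Int × Int)), d.keys.Nodup →
    ((l.foldl pvStepA d).values.filter (fun p => p.2 == 1)).map (fun p => p.1)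
      = d.items.filterMap
          (fun kv => if kv.2.2 + ((l.map pvKey).count kv.1 : Int) == 1 then some kv.2.1 else none)
        ++ l.filter (fun f => !(d.contains (pvKey f)) && ((l.map pvKey).count (pvKey f) == 1)) := by
  induction l with
  | nil =>
      intro d _
      simp only [List.foldl_nil, List.map_nil, List.count_nil, List.filter_nil, List.append_nil]
      rw [pv_extract_eq]
      apply List.filterMap_congr
      intro kv _
      norm_num
  | cons f t ih =>
      intro d hnd
      simp only [List.foldl_cons]
      rw [ih (pvStepA d f) (pv_nodup_step d f hnd)]
      by_cases h : d.contains (pvKey f) = true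
      · -- existing key: modify bumps the count in place
        have hstep : pvStepA d f
            = d.insert (pvKey f) ((d.getD (pvKey f) ([], 0)).1, (d.getD (pvKey f) ([], 0)).2 + 1) := by
          simp [pvStepA, h, PySem.Dict.modify]
        rw [hstep]
        congr 1
        · -- filterMap parts agree
          rw [PySem.Dict.items_insert_of_contains d _ h, List.filterMap_map]
          apply List.filterMap_congr
          intro kv hkv
          rcases kv with ⟨k, v⟩
          by_cases hk : k = pvKey f
          · subst hk
            have hv : d.getD (pvKey f) ([], 0) = v :=
              PySem.Dict.getD_of_mem_items d hkv hnd _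
            simp only [Function.comp_apply, beq_self_eq_true, if_true, hv,
              List.map_cons, List.count_cons]
            have hiff : (v.2 + 1 + ((t.map pvKey).count (pvKey f) : Int) = 1)
                ↔ (v.2 + (((t.map pvKey).count (pvKey f)
                    + if (pvKey f == pvKey f) = true then 1 else 0 : Nat) : Int) = 1) := by
              simp only [beq_self_eq_true, if_true]
              push_cast
              omega
            simp only [beq_iff_eq, hiff]
            simp
          · have hbeq : (k == pvKey f) = false := beq_eq_false_iff_ne.mpr hk
            have hbeq2 : (pvKey f == k) = false := beq_eq_false_iff_ne.mpr (Ne.symm hk)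
            simp only [Function.comp_apply, hbeq, Bool.false_eq_true, if_false,
              List.map_cons, List.count_cons, hbeq2, Nat.add_zero]
        · -- filter parts agree
          simp only [List.filter_cons]
          have hhead : (!(d.contains (pvKey f))
              && (((f :: t).map pvKey).count (pvKey f) == 1)) = false := by
            simp [h]
          rw [hhead]
          simp only [Bool.false_eq_true, if_false]
          apply List.filter_congr
          intro x hx
          rw [PySem.Dict.contains_insert]
          by_cases hk : pvKey x = pvKey f
          · have hb1 : (pvKey x == pvKey f) = true := by simp [hk]
            have hb2 : d.contains (pvKey x) = true := hk ▸ h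
            simp [hb1, hb2]
          · have hb1 : (pvKey x == pvKey f) = false := beq_eq_false_iff_ne.mpr hk
            have hb2 : (pvKey f == pvKey x) = false := beq_eq_false_iff_ne.mpr (Ne.symm hk)
            simp only [hb1, Bool.false_or, List.map_cons, List.count_cons, hb2,
              Bool.false_eq_true, if_false, Nat.add_zero]
      · -- fresh key: insert appends (face, 1)
        have hb : d.contains (pvKey f) = false := by
          cases hc : d.contains (pvKey f)
          · rfl
          · exact absurd hc h
        have hstep : pvStepA d f = d.insert (pvKey f) (f, 1) := by
          simp [pvStepA, hb]
        rw [hstep, PySem.Dict.items_insert_of_not_contains d _ hb, List.filterMap_append]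
        have hfresh : ∀ kv ∈ d.items, kv.1 ≠ pvKey f := by
          intro kv hkv hk
          have : d.contains kv.1 = true :=
            (PySem.Dict.contains_iff_mem_keys _ _).mpr (PySem.Dict.mem_keys_of_mem_items d hkv)
          rw [hk] at this
          exact h this
        have hmain : d.items.filterMap
              (fun kv => if kv.2.2 + ((t.map pvKey).count kv.1 : Int) == 1 then some kv.2.1 else none)
            = d.items.filterMap
              (fun kv => if kv.2.2 + (((f :: t).map pvKey).count kv.1 : Int) == 1 then some kv.2.1 else none) := by
          apply List.filterMap_congr
          intro kv hkv
          have hb : (pvKey f == kv.1) = false :=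
            beq_eq_false_iff_ne.mpr (Ne.symm (hfresh kv hkv))
          simp only [List.map_cons, List.count_cons, hb, Bool.false_eq_true, if_false, Nat.add_zero]
        rw [hmain, List.append_assoc]
        congr 1
        simp only [List.filterMap_cons, List.filter_cons]
        have hcnt : (((f :: t).map pvKey).count (pvKey f) : Nat)
            = (t.map pvKey).count (pvKey f) + 1 := by
          simp
        have hheadeq : (!(d.contains (pvKey f))
            && (((f :: t).map pvKey).count (pvKey f) == 1))
            = (((1 : Int) + ((t.map pvKey).count (pvKey f) : Int)) == 1) := by
          rw [hb, hcnt]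
          simp only [Bool.not_false, Bool.true_and]
          rcases hc0 : (t.map pvKey).count (pvKey f) with _ | n
          · simp
          · have h1 : (((n + 1 + 1 : Nat)) == (1 : Nat)) = false :=
              beq_eq_false_iff_ne.mpr (by omega)
            have h2 : (((1 : Int) + ((n + 1 : Nat) : Int)) == (1 : Int)) = false :=
              beq_eq_false_iff_ne.mpr (by push_cast; omega)
            rw [h1, h2]
        have htail : t.filter (fun x => !((d.insert (pvKey f) (f, 1)).contains (pvKey x))
              && ((t.map pvKey).count (pvKey x) == 1))
            = t.filter (fun x => !(d.contains (pvKey x))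
              && (((f :: t).map pvKey).count (pvKey x) == 1)) := by
          apply List.filter_congr
          intro x hx
          rw [PySem.Dict.contains_insert]
          by_cases hk : pvKey x = pvKey f
          · have hmem : pvKey x ∈ t.map pvKey := List.mem_map_of_mem hx
            have hge : 1 ≤ (t.map pvKey).count (pvKey x) := List.one_le_count_iff.mpr hmem
            have hb2 : (pvKey f == pvKey x) = true := by simp [hk]
            have hc : (((f :: t).map pvKey).count (pvKey x) == 1) = false := by
              simp only [List.map_cons, List.count_cons, hb2, if_true]
              exact beq_eq_false_iff_ne.mpr (by omega)
            have hb1 : (pvKey x == pvKey f) = true := by simp [hk]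
            rw [hb1]
            simp only [Bool.true_or, Bool.not_true, Bool.false_and, hc, Bool.and_false]
          · have h1 : (pvKey x == pvKey f) = false := by simp [hk]
            have h2 : (pvKey f == pvKey x) = false := by simp [Ne.symm hk]
            simp [h1, h2, List.count_cons]
        rw [htail, hheadeq]
        rcases hcond : ((1 : Int) + ((t.map pvKey).count (pvKey f) : Int)) == 1
        · simp
        · simp

-- B's worklist elimination computes 'keep the pairs whose key occurs exactly once'
theorem pv_loopB (n : Nat) : ∀ (pairs : List (List Int × List Int)), pairs.length ≤ n →
    pvLoopB pairs
      = (pairs.filter (fun p => (pairs.map Prod.snd).count p.2 == 1)).map Prod.fst := by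
  induction n with
  | zero =>
      intro pairs hlen
      have : pairs = [] := List.eq_nil_of_length_eq_zero (Nat.le_zero.mp hlen)
      subst this; simp [pvLoopB]
  | succ n ih =>
      intro pairs hlen
      match pairs with
      | [] => simp [pvLoopB]
      | (f, k) :: rest =>
          simp only [List.length_cons, Nat.succ_le_succ_iff] at hlen
          rw [pvLoopB]
          simp only [List.map_cons]
          by_cases hdup : rest.any (fun p => p.2 == k) = true
          · rw [if_pos hdup]
            have hrl : (rest.filter (fun p => p.2 != k)).length ≤ n :=
              le_trans (List.length_filter_le _ _) hlen
            rw [ih _ hrl]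
            -- head's key occurs ≥ 2 times, so the head is dropped on the right
            obtain ⟨q, hq, hqk⟩ := List.any_eq_true.mp hdup
            have hqk' : q.2 = k := by simpa using hqk
            have hmem : k ∈ rest.map Prod.snd := hqk' ▸ List.mem_map_of_mem hq
            have hge : 1 ≤ (rest.map Prod.snd).count k := List.one_le_count_iff.mpr hmem
            have hhead : ((k :: rest.map Prod.snd).count k == 1) = false := by
              simp only [List.count_cons, beq_self_eq_true, if_true]
              exact beq_eq_false_iff_ne.mpr (by omega)
            simp only [List.filter_cons, hhead, Bool.false_eq_true, if_false]
            -- filtering rest by the full count == filtering the k-free rest by its own count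
            have hsplit : rest.filter (fun p => (k :: rest.map Prod.snd).count p.2 == 1)
                = (rest.filter (fun p => p.2 != k)).filter
                    (fun p => (k :: rest.map Prod.snd).count p.2 == 1) := by
              rw [List.filter_filter]
              apply List.filter_congr
              intro p hp
              by_cases hpk : p.2 = k
              · have hthis : ((k :: rest.map Prod.snd).count p.2 == 1) = false := by
                  simp only [List.count_cons, hpk, beq_self_eq_true, if_true]
                  exact beq_eq_false_iff_ne.mpr (by omega)
                simp [hpk]
                omega
              · simp [hpk]
            rw [hsplit]
            congr 1
            apply List.filter_congr
            intro p hp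
            have hpk : (p.2 != k) = true := (List.mem_filter.mp hp).2
            have hne : p.2 ≠ k := by simpa using hpk
            congr 1
            -- counts agree: head key k ≠ p.2 and only key-k pairs were removed
            simp only [List.count_cons,
              beq_eq_false_iff_ne.mpr (fun h => hne h.symm), Bool.false_eq_true, if_false,
              Nat.add_zero]
            rw [List.count_eq_countP, List.count_eq_countP, List.countP_map, List.countP_map,
              List.countP_filter]
            apply List.countP_congr
            intro q _
            by_cases hqk2 : q.2 = p.2
            · have h1 : (q.2 != k) = true := by
                simp [hqk2]; exact hne
              simp [Function.comp, hqk2]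
              exact hne
            · simp [Function.comp, beq_eq_false_iff_ne.mpr hqk2]
          · rw [if_neg hdup]
            rw [ih rest hlen]
            have hnot : ∀ q ∈ rest, q.2 ≠ k := by
              intro q hq hk2
              exact hdup (List.any_eq_true.mpr ⟨q, hq, by simp [hk2]⟩)
            have hcnt0 : (rest.map Prod.snd).count k = 0 := by
              rw [List.count_eq_zero]
              intro hmem
              obtain ⟨q, hq, hqk⟩ := List.mem_map.mp hmem
              exact hnot q hq hqk
            have hhead : ((k :: rest.map Prod.snd).count k == 1) = true := by
              simp [hcnt0]
            simp only [List.filter_cons, List.map_cons, hhead, if_true]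
            simp only [List.cons.injEq, true_and]
            congr 1
            apply List.filter_congr
            intro p hp
            have hne : p.2 ≠ k := hnot p hp
            congr 1
            simp [List.count_cons, beq_eq_false_iff_ne.mpr (fun h => hne h.symm)]

-- ===== VERDICT (by name: the statement is the Claim_ definition above) =====
theorem remove_shared_faces_spec : Claim_equal_remove_shared_faces := by
  intro all_faces _
  unfold Spec_remove_shared_faces remove_shared_faces remove_shared_faces_alt
  rw [pv_loopA all_faces PySem.Dict.empty PySem.Dict.nodup_keys_empty]
  have hempty : (PySem.Dict.empty : PySem.Dict (List Int) (List Int × Int)).items = [] := rfl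
  rw [hempty]
  rw [pv_loopB (all_faces.map (fun face => (face, pvKey face))).length _ le_rfl]
  rw [List.filter_map, List.map_map]
  simp [PySem.Dict.contains_empty, Function.comp_def]
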